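-- pv_equiv track=rewrite | github.com/singularityrms/OLHWG | generate_line.py | parser_label
-- ===== SOURCE A (Python) =====
-- def parser_label(label):
--     ## 输入一个label list 返回其中每个字符的长度
--     duration = []
--     l = 0
--     total = len(label)
--
--     for k in range(total):
--         if label[k] == 4052:
--             duration.append(total - k)
--             return duration
--         elif label[k] == 4054:
--             l += 1
--             duration.append(l)
--             l = 0
--         else:
--             l += 1
--
--     return duration
-- ===== SOURCE B (Python) =====
-- def parser_label(label):
--     # Two-phase: cut at the first 4052, index the 4054 boundaries, then take differences.
--     cut = next((k for k, v in enumerate(label) if v == 4052), None)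
--     pre = label if cut is None else label[:cut]
--     bounds = []
--     for k, v in enumerate(pre):
--         if v == 4054:
--             bounds.append(k)
--     duration = []
--     prev = -1
--     for s in bounds:
--         duration.append(s - prev)
--         prev = s
--     if cut is not None:
--         duration.append(len(label) - cut)
--     return duration
-- ===== Notes on version B (the rewrite author's own statement) =====
-- stated objective: alternative
-- what changed: Replaces A's single loop with a running character counter and early return by a two-phase computation: locate the first 4052 (cut), collect the indices of 4054 before the cut, and emit durations as successive index differences (plus the tail length if a 4052 exists).
import Mathlib
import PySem

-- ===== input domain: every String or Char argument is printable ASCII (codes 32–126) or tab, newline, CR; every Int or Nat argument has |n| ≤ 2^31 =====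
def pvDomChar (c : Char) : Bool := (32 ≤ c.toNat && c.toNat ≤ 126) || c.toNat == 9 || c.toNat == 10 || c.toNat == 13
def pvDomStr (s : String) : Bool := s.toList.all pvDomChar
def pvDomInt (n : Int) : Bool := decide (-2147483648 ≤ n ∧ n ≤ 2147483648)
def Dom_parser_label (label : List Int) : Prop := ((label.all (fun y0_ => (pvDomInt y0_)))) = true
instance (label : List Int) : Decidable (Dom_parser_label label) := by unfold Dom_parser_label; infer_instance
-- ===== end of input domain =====

-- B replaces A's one-pass running counter with a two-phase cut/boundary-index/difference computation; same values (objective: alternative).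

-- ===== PORT A =====
-- A's for-loop over range(total) with early return, as structural recursion over the list keeping index k, accumulator duration, counter l
def pl_goA : List Int → Int → Nat → List Int → Int → List Int
  | [], _, _, dur, _ => dur
  | x :: rest, total, k, dur, l =>
    if x = 4052 then dur ++ [total - (k : Int)]
    else if x = 4054 then pl_goA rest total (k + 1) (dur ++ [l + 1]) 0
    else pl_goA rest total (k + 1) dur (l + 1)

def parser_label (label : List Int) : List Int :=
  pl_goA label (label.length : Int) 0 [] 0

-- ===== PORT B =====
-- 'for k, v in enumerate(pre): if v == 4054: bounds.append(k)'
def pl_boundsLoop : List Int → Nat → List Int → List Int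
  | [], _, acc => acc
  | v :: rest, k, acc => pl_boundsLoop rest (k + 1) (if v = 4054 then acc ++ [(k : Int)] else acc)

-- 'for s in bounds: duration.append(s - prev); prev = s'
def pl_diffLoop : List Int → List Int → Int → List Int
  | [], dur, _ => dur
  | s :: rest, dur, prev => pl_diffLoop rest (dur ++ [s - prev]) s

def parser_label_alt (label : List Int) : List Int :=
  let cut := List.findIdx? (fun v => v == (4052 : Int)) label
  let pre := match cut with | none => label | some c => List.take c label
  let bounds := pl_boundsLoop pre 0 []
  let duration := pl_diffLoop bounds [] (-1)
  match cut with
  | none => duration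
  | some c => duration ++ [(label.length : Int) - (c : Int)]

-- ===== PRECONDITION & SPEC =====
def Spec_parser_label (label : List Int) (out : List Int) : Prop := out = parser_label_alt label
instance (label : List Int) (out : List Int) : Decidable (Spec_parser_label label out) := by unfold Spec_parser_label; infer_instance

-- ===== CLAIM (what is proved, stated in full; the proofs are below) =====
def Claim_equal_parser_label : Prop := ∀ (label : List Int), Dom_parser_label label → Spec_parser_label label (parser_label label)

-- ===== LEMMAS AND PROOFS =====

-- cons-form of the bounds loop (proof helper)
def pl_bnds : List Int → Nat → List Int
  | [], _ => []
  | v :: rest, k => if v = 4054 then (k : Int) :: pl_bnds rest (k + 1) else pl_bnds rest (k + 1)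

-- cons-form of the difference loop (proof helper)
def pl_diffs : List Int → Int → List Int
  | [], _ => []
  | s :: rest, prev => (s - prev) :: pl_diffs rest s

theorem pl_boundsLoop_eq (xs : List Int) : ∀ (k : Nat) (acc : List Int),
    pl_boundsLoop xs k acc = acc ++ pl_bnds xs k := by
  induction xs with
  | nil => intro k acc; simp [pl_boundsLoop, pl_bnds]
  | cons v rest ih =>
    intro k acc
    by_cases h : v = 4054 <;> simp [pl_boundsLoop, pl_bnds, h, ih]

theorem pl_diffLoop_eq (bs : List Int) : ∀ (dur : List Int) (prev : Int),
    pl_diffLoop bs dur prev = dur ++ pl_diffs bs prev := by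
  induction bs with
  | nil => intro dur prev; simp [pl_diffLoop, pl_diffs]
  | cons s rest ih => intro dur prev; simp [pl_diffLoop, pl_diffs, ih]

theorem pl_goA_append (xs : List Int) : ∀ (total : Int) (k : Nat) (dur l : _),
    pl_goA xs total k dur l = dur ++ pl_goA xs total k [] l := by
  induction xs with
  | nil => intro total k dur l; simp [pl_goA]
  | cons x rest ih =>
    intro total k dur l
    by_cases h1 : x = 4052
    · simp [pl_goA, h1]
    · by_cases h2 : x = 4054
      · simp only [pl_goA, if_neg h1, if_pos h2]
        rw [ih total (k+1) (dur ++ [l+1]) 0, ih total (k+1) ([] ++ [l+1]) 0]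
        simp
      · simp only [pl_goA, if_neg h1, if_neg h2]
        exact ih total (k+1) dur (l+1)

-- the value of A's loop on a suffix, expressed with B's building blocks
def pl_altS (rest : List Int) (total : Int) (k : Nat) (l : Int) : List Int :=
  match List.findIdx? (fun v => v == (4052 : Int)) rest with
  | none => pl_diffs (pl_bnds rest k) ((k : Int) - l - 1)
  | some c => pl_diffs (pl_bnds (List.take c rest) k) ((k : Int) - l - 1) ++ [total - (k : Int) - (c : Int)]

theorem pl_key (rest : List Int) : ∀ (total : Int) (k : Nat) (l : Int),
    pl_goA rest total k [] l = pl_altS rest total k l := by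
  induction rest with
  | nil => intro total k l; simp [pl_goA, pl_altS, pl_bnds, pl_diffs]
  | cons x tl ih =>
    intro total k l
    by_cases h1 : x = 4052
    · simp [pl_goA, pl_altS, h1, List.findIdx?_cons, pl_bnds, pl_diffs]
    · by_cases h2 : x = 4054
      · simp only [pl_goA, if_neg h1, if_pos h2]
        rw [pl_goA_append, ih total (k+1) 0]
        simp only [pl_altS, List.findIdx?_cons, h1, beq_iff_eq]
        cases hf : List.findIdx? (fun v => v == (4052 : Int)) tl with
        | none =>
          simp only [Option.map_none]
          simp [pl_bnds, h2, pl_diffs]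
          omega
        | some c =>
          simp only [Option.map_some]
          simp [pl_bnds, h2, pl_diffs, List.take_succ_cons]
          omega
      · simp only [pl_goA, if_neg h1, if_neg h2]
        rw [ih total (k+1) (l+1)]
        simp only [pl_altS, List.findIdx?_cons, beq_iff_eq, if_neg h1]
        cases hf : List.findIdx? (fun v => v == (4052 : Int)) tl with
        | none =>
          simp only [Option.map_none]
          simp [pl_bnds, h2]
        | some c =>
          simp only [Option.map_some]
          simp [pl_bnds, h2, List.take_succ_cons]
          omega

-- ===== VERDICT (by name: the statement is the Claim_ definition above) =====
theorem parser_label_spec : Claim_equal_parser_label := by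
  intro label _
  unfold Spec_parser_label parser_label parser_label_alt
  rw [pl_key label (label.length : Int) 0 0]
  simp only [pl_altS]
  cases hf : List.findIdx? (fun v => v == (4052 : Int)) label with
  | none => simp [pl_boundsLoop_eq, pl_diffLoop_eq]
  | some c => simp [pl_boundsLoop_eq, pl_diffLoop_eq]
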